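-- pv_equiv track=rewrite | github.com/oberonforall/syntax | scripts/website.py | multiline_find_replace
-- ===== SOURCE A (Python) =====
-- from typing import Any, Dict, List
--
-- def multiline_find_replace(
--     lines: List[str],
--     find: str,
--     replace: List[str]
-- ) -> List[str]:
--     indices = [i for i, line in enumerate(lines) if find in line]
--     if len(indices) != 1:
--         return None
--
--     index = indices[0]
--
--     for repl in replace[::-1]:
--         line = lines[index].replace(find, repl)
--         lines.insert(index + 1, line)
--     lines.pop(index)
--
--     return lines
-- ===== SOURCE B (Python) =====
-- def multiline_find_replace(lines, find, replace):
--     # Single backward pass over the lines with an accumulator: count matches and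
--     # build the rebuilt file at the same time; no index arithmetic, no splice.
--     # Mutates `lines` in place in the single-match case, like the original.
--     count = 0
--     out = []
--     for line in reversed(lines):
--         if find in line:
--             count += 1
--             out.extend(line.replace(find, r) for r in reversed(replace))
--         else:
--             out.append(line)
--     if count != 1:
--         return None
--     out.reverse()
--     lines[:] = out
--     return lines
-- ===== Notes on version B (the rewrite author's own statement) =====
-- stated objective: alternative
-- what changed: Replace A's two staged passes (index comprehension + uniqueness check, then a reversed insert/pop splice at the found index) by one backward fold that simultaneously counts matches and accumulates the rebuilt list with no index arithmetic at all.
import Mathlib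
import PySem

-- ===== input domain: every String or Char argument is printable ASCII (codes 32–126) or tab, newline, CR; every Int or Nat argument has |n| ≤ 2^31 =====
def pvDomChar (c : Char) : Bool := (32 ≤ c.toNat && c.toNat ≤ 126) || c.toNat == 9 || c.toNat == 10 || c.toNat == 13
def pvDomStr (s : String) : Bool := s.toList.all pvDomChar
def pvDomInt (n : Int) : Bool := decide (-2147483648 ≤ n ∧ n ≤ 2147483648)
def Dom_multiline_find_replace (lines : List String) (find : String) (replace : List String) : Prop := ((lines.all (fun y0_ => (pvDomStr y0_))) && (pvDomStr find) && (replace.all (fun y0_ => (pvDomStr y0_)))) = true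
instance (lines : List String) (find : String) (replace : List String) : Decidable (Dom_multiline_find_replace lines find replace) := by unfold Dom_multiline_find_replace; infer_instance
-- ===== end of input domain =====

-- B replaces A's staged passes (index list + uniqueness check, then a reversed insert/pop
-- splice at the found index) by ONE backward fold that counts matches and accumulates the
-- rebuilt list, with no index arithmetic (alternative decomposition; both Pythons mutate
-- the caller's list in the single-match case, the equivalence here is about the return value).

-- ===== PORT A =====
-- indices = [i for i, line in enumerate(lines) if find in line]; guarded indices[0];
-- for repl in replace[::-1]: insert at index+1 the replaced copy of lines[index]; then pop(index).
def multiline_find_replace (lines : List String) (find : String) (replace : List String) : Option (List String) :=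
  let indices := ((PySem.List.enumerate lines 0).filter (fun p => PySem.Str.isIn find p.2)).map (fun p => p.1)
  if indices.length ≠ 1 then none
  else
    -- indices[0]: guarded by the length check, so the default is never used
    let index : Int := (PySem.List.pyGet? indices 0).getD 0
    -- replace[::-1] = slice with step -1; lines[index] inside the loop (in range, default unused)
    let lines1 := ((PySem.List.slice? replace none none (-1)).getD []).foldl
      (fun acc repl =>
        PySem.List.insert acc (index + 1) (PySem.Str.replace ((PySem.List.pyGet? acc index).getD "") find repl)) lines
    match PySem.List.pop? lines1 index with
    | some (_, rest) => some rest
    | none => none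

-- ===== PORT B =====
-- the backward accumulating loop: for line in reversed(lines): count matches,
-- out.extend(substitutions of reversed(replace)) or out.append(line)
def multiline_find_replace_alt (lines : List String) (find : String) (replace : List String) : Option (List String) :=
  let st := lines.reverse.foldl
    (fun (acc : Int × List String) line =>
      if PySem.Str.isIn find line then
        (acc.1 + 1, acc.2 ++ replace.reverse.map (fun r => PySem.Str.replace line find r))
      else
        (acc.1, acc.2 ++ [line]))
    ((0 : Int), ([] : List String))
  if st.1 ≠ 1 then none else some st.2.reverse

-- ===== PRECONDITION & SPEC =====
def Spec_multiline_find_replace (lines : List String) (find : String) (replace : List String) (out : Option (List String)) : Prop := out = multiline_find_replace_alt lines find replace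
instance (lines : List String) (find : String) (replace : List String) (out : Option (List String)) : Decidable (Spec_multiline_find_replace lines find replace out) := by unfold Spec_multiline_find_replace; infer_instance

-- ===== CLAIM (what is proved, stated in full; the proofs are below) =====
def Claim_equal_multiline_find_replace : Prop := ∀ (lines : List String) (find : String) (replace : List String), Dom_multiline_find_replace lines find replace → Spec_multiline_find_replace lines find replace (multiline_find_replace lines find replace)


-- ===== LEMMAS AND PROOFS =====

-- the per-line chunk of the FORWARD rebuilt list
def pvChunk (find : String) (replace : List String) (l : String) : List String :=
  if PySem.Str.isIn find l then replace.map (fun r => PySem.Str.replace l find r) else [l]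

theorem pvChunk_pos (find : String) (replace : List String) (l : String)
    (h : PySem.Str.isIn find l = true) :
    pvChunk find replace l = replace.map (fun r => PySem.Str.replace l find r) := by
  unfold pvChunk; rw [if_pos h]

theorem pvChunk_neg (find : String) (replace : List String) (l : String)
    (h : PySem.Str.isIn find l = false) :
    pvChunk find replace l = [l] := by
  unfold pvChunk
  rw [if_neg (by intro hc; rw [h] at hc; cases hc)]

-- B's fold, characterised: it adds the match count and appends the flatMap of the reversed chunks
theorem fold_B_spec (find : String) (replace : List String) (L : List String)
    (c : Int) (o : List String) :
    L.foldl
      (fun (acc : Int × List String) line =>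
        if PySem.Str.isIn find line then
          (acc.1 + 1, acc.2 ++ replace.reverse.map (fun r => PySem.Str.replace line find r))
        else
          (acc.1, acc.2 ++ [line])) (c, o)
    = (c + ((L.filter (fun l => PySem.Str.isIn find l)).length : Int),
       o ++ L.flatMap (fun l => (pvChunk find replace l).reverse)) := by
  induction L generalizing c o with
  | nil => simp
  | cons x t ih =>
    simp only [List.foldl_cons]
    by_cases hx : PySem.Str.isIn find x = true
    · rw [if_pos hx, ih, List.filter_cons_of_pos hx, List.flatMap_cons]
      rw [pvChunk_pos find replace x hx]
      simp only [List.map_reverse, List.length_cons, Prod.mk.injEq]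
      refine ⟨by push_cast; ring, by simp [List.append_assoc]⟩
    · rw [if_neg hx, ih, List.filter_cons_of_neg hx, List.flatMap_cons]
      rw [pvChunk_neg find replace x (eq_false_of_ne_true hx)]
      simp only [Prod.mk.injEq]
      refine ⟨trivial, by simp [List.append_assoc]⟩

-- a stretch with no match contributes itself to the flatMap
theorem flatMap_noMatch (find : String) (replace : List String) (M : List String)
    (h : ∀ l ∈ M, PySem.Str.isIn find l = false) :
    M.flatMap (pvChunk find replace) = M := by
  induction M with
  | nil => rfl
  | cons x t ih =>
    rw [List.flatMap_cons, pvChunk_neg find replace x (h x List.mem_cons_self),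
      ih (fun l hl => h l (List.mem_cons_of_mem _ hl))]
    rfl

-- unique match at k: the flatMap is exactly A's take/map/drop shape
theorem flatMap_unique (find : String) (replace : List String) (L : List String) (k : Nat)
    (hk : k < L.length) (hmatch : PySem.Str.isIn find L[k] = true)
    (hother : ∀ j, (hj : j < L.length) → j ≠ k → PySem.Str.isIn find L[j] = false) :
    L.flatMap (pvChunk find replace) =
      L.take k ++ replace.map (fun r => PySem.Str.replace L[k] find r) ++ L.drop (k+1) := by
  conv_lhs => rw [show L = L.take k ++ L[k] :: L.drop (k+1) by
    rw [← List.drop_eq_getElem_cons hk, List.take_append_drop]]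
  rw [List.flatMap_append, List.flatMap_cons]
  rw [flatMap_noMatch find replace (L.take k) (by
    intro l hl
    obtain ⟨i, hi, hil⟩ := List.getElem_of_mem hl
    have hik : i < k := by simp [List.length_take] at hi; omega
    rw [← hil, List.getElem_take]
    exact hother i (by omega) (by omega))]
  rw [flatMap_noMatch find replace (L.drop (k+1)) (by
    intro l hl
    obtain ⟨i, hi, hil⟩ := List.getElem_of_mem hl
    rw [← hil, List.getElem_drop]
    exact hother (k+1+i) (by simp at hi; omega) (by omega))]
  rw [pvChunk_pos find replace _ hmatch]
  simp [List.append_assoc]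

-- counting matches through enumerate
theorem length_filter_enumerate (find : String) (L : List String) (s : Int) :
    ((PySem.List.enumerate L s).filter (fun p => PySem.Str.isIn find p.2)).length
      = (L.filter (fun l => PySem.Str.isIn find l)).length := by
  induction L generalizing s with
  | nil => rw [PySem.List.enumerate_nil]; rfl
  | cons x t ih =>
    rw [PySem.List.enumerate_cons, List.filter_cons, List.filter_cons]
    by_cases hx : PySem.Str.isIn find x = true
    · rw [if_pos hx, if_pos hx, List.length_cons, List.length_cons, ih]
    · rw [if_neg hx, if_neg hx, ih]

-- the insert fold keeps the shape take (k+1) ++ mid ++ drop (k+1) and conses onto mid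
theorem fold_insert_spec (L0 : List String) (find : String) (k : Nat) (hk : k < L0.length)
    (rs : List String) (m : List String) :
    rs.foldl (fun acc repl =>
        PySem.List.insert acc ((k : Int) + 1)
          (PySem.Str.replace ((PySem.List.pyGet? acc (k : Int)).getD "") find repl))
      (L0.take (k+1) ++ m ++ L0.drop (k+1))
    = L0.take (k+1) ++ rs.foldl (fun m' repl => PySem.Str.replace L0[k] find repl :: m') m
        ++ L0.drop (k+1) := by
  induction rs generalizing m with
  | nil => rfl
  | cons r rs ih =>
    have hlen1 : (L0.take (k+1)).length = k+1 := by
      simp [List.length_take]; omega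
    have hget : PySem.List.pyGet? (L0.take (k+1) ++ m ++ L0.drop (k+1)) (k : Int) = some L0[k] := by
      rw [PySem.List.pyGet?_natCast, List.append_assoc,
        List.getElem?_append_left (by omega)]
      simp [hk]
    have hins : PySem.List.insert (L0.take (k+1) ++ m ++ L0.drop (k+1)) ((k : Int) + 1)
        (PySem.Str.replace L0[k] find r)
        = L0.take (k+1) ++ (PySem.Str.replace L0[k] find r :: m) ++ L0.drop (k+1) := by
      have hcast : ((k : Int) + 1) = ((k + 1 : Nat) : Int) := by push_cast; ring
      rw [hcast, PySem.List.insert_natCast _ (k+1) _ (by simp; omega)]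
      rw [List.append_assoc, List.take_append_of_le_length (by omega), List.take_of_length_le (by omega),
        List.drop_append_of_le_length (by omega), List.drop_of_length_le (by omega)]
      simp
    rw [List.foldl_cons, hget, Option.getD_some, hins, ih, List.foldl_cons]

-- folding cons over the reversed list is map ++
theorem foldl_cons_reverse {A B : Type} (f : A -> B) (l : List A) (m : List B) :
    l.reverse.foldl (fun a r => f r :: a) m = l.map f ++ m := by
  induction l generalizing m with
  | nil => rfl
  | cons x l ih => simp [List.foldl_append, ih]

-- B's port, closed up: count over the forward list, output as a forward flatMap
theorem alt_eq (lines : List String) (find : String) (replace : List String) :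
    multiline_find_replace_alt lines find replace =
      if (lines.filter (fun l => PySem.Str.isIn find l)).length ≠ 1 then none
      else some (lines.flatMap (pvChunk find replace)) := by
  unfold multiline_find_replace_alt
  rw [fold_B_spec]
  have hrev : (lines.reverse.flatMap (fun l => (pvChunk find replace l).reverse)).reverse
      = lines.flatMap (pvChunk find replace) := by
    rw [List.flatMap_reverse, List.reverse_reverse]
    congr 1
    funext l
    simp [Function.comp]
  simp only [List.filter_reverse, List.length_reverse, zero_add, List.nil_append]
  rw [hrev]
  by_cases h : (lines.filter (fun l => PySem.Str.isIn find l)).length = 1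
  · have hC : (lines.filter (fun l => PySem.Chars.isIn find.toList l.toList)).length = 1 := by
      simpa using h
    rw [if_neg (show ¬ ((((lines.filter (fun l => PySem.Str.isIn find l)).length : Nat) : Int) ≠ 1) by
        simp [hC]),
      if_neg (show ¬ ((lines.filter (fun l => PySem.Str.isIn find l)).length ≠ 1) by simp [hC])]
  · rw [if_pos (show (((lines.filter (fun l => PySem.Str.isIn find l)).length : Nat) : Int) ≠ 1 by
        exact_mod_cast h),
      if_pos h]

theorem multiline_find_replace_spec : Claim_equal_multiline_find_replace := by
  unfold Claim_equal_multiline_find_replace Spec_multiline_find_replace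
  intro lines find replace _
  rw [alt_eq]
  unfold multiline_find_replace
  have hlen : ((((PySem.List.enumerate lines 0).filter (fun p => PySem.Str.isIn find p.2)).map (fun p => p.1)).length)
      = (lines.filter (fun l => PySem.Str.isIn find l)).length := by
    rw [List.length_map, length_filter_enumerate]
  by_cases hone : (lines.filter (fun l => PySem.Str.isIn find l)).length = 1
  · -- exactly one match
    obtain ⟨p, hp⟩ : ∃ p, (PySem.List.enumerate lines 0).filter (fun p => PySem.Str.isIn find p.2) = [p] :=
      List.length_eq_one_iff.mp (by rw [length_filter_enumerate]; exact hone)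
    obtain ⟨k, hk, hpk⟩ : ∃ (k : Nat) (h : k < lines.length), p = ((k : Int), lines[k]'h) := by
      have hmem : p ∈ (PySem.List.enumerate lines 0).filter (fun p => PySem.Str.isIn find p.2) := by
        rw [hp]; exact List.mem_cons_self
      obtain ⟨hq, _⟩ := List.mem_filter.mp hmem
      obtain ⟨k, hklt, hpk⟩ := (PySem.List.mem_enumerate_iff lines 0 p).mp hq
      exact ⟨k, hklt, by rw [hpk]; simp⟩
    have hmatch : PySem.Str.isIn find lines[k] = true := by
      have hmem : p ∈ (PySem.List.enumerate lines 0).filter (fun p => PySem.Str.isIn find p.2) := by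
        rw [hp]; exact List.mem_cons_self
      have := (List.mem_filter.mp hmem).2
      rw [hpk] at this; exact this
    have hother : ∀ j, (hj : j < lines.length) → j ≠ k →
        PySem.Str.isIn find lines[j] = false := by
      intro j hj hjk
      by_contra hmj
      have hmj' : PySem.Str.isIn find lines[j] = true := by
        cases h : PySem.Str.isIn find lines[j] with
        | false => exact absurd h hmj
        | true => rfl
      have hqmem : ((j : Int), lines[j]) ∈
          (PySem.List.enumerate lines 0).filter (fun p => PySem.Str.isIn find p.2) := by
        refine List.mem_filter.mpr ⟨?_, by simpa using hmj'⟩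
        exact (PySem.List.mem_enumerate_iff lines 0 _).mpr ⟨j, hj, by simp⟩
      rw [hp] at hqmem
      have : ((j : Int), lines[j]) = p := by simpa using hqmem
      rw [hpk] at this
      refine hjk ?_
      have hfst := congrArg Prod.fst this
      simp at hfst
      exact_mod_cast hfst
    rw [hp]
    simp only [List.map_cons, List.map_nil]
    have honeC : (lines.filter (fun l => PySem.Chars.isIn find.toList l.toList)).length = 1 := by
      simpa using hone
    rw [if_neg (by simp), if_neg (by simp [honeC])]
    have hidx0 : (PySem.List.pyGet? [p.1] 0).getD 0 = (k : Int) := by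
      rw [hpk]; simp [PySem.List.pyGet?, PySem.List.pyIdx?]
    simp only [hidx0]
    rw [show ((PySem.List.slice? replace none none (-1)).getD []) = replace.reverse by
      rw [PySem.List.slice?_none_none_neg_one]; rfl]
    have hfold : (List.foldl
        (fun acc repl =>
          PySem.List.insert acc ((k : Int) + 1) (PySem.Str.replace ((PySem.List.pyGet? acc (k : Int)).getD "") find repl))
        lines replace.reverse)
        = lines.take (k+1) ++ replace.map (fun r => PySem.Str.replace lines[k] find r) ++ lines.drop (k+1) := by
      conv_lhs => rw [show lines = lines.take (k+1) ++ [] ++ lines.drop (k+1) by simp]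
      rw [fold_insert_spec lines find k hk replace.reverse []]
      rw [foldl_cons_reverse]
      simp
    rw [hfold]
    have hlen2 : k < (lines.take (k+1) ++ replace.map (fun r => PySem.Str.replace lines[k] find r) ++ lines.drop (k+1)).length := by
      simp [List.length_take]; omega
    rw [PySem.List.pop?_natCast _ k hlen2]
    have her : (lines.take (k+1) ++ replace.map (fun r => PySem.Str.replace lines[k] find r) ++ lines.drop (k+1)).eraseIdx k
        = lines.take k ++ replace.map (fun r => PySem.Str.replace lines[k] find r) ++ lines.drop (k+1) := by
      have htk : lines.take (k+1) = lines.take k ++ [lines[k]] := by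
        rw [List.take_add_one]; simp [List.getElem?_eq_getElem hk]
      rw [List.append_assoc, List.eraseIdx_append_of_lt_length (by rw [List.length_take]; omega), htk]
      rw [List.eraseIdx_append_of_length_le (by rw [List.length_take]; omega)]
      simp [List.length_take, Nat.min_eq_left (Nat.le_of_lt hk)]
    rw [her]
    rw [flatMap_unique find replace lines k hk hmatch hother]
  · -- zero or several matches: both sides are none
    rw [if_pos (by rw [hlen]; exact hone), if_pos hone]
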